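-- pv_equiv track=rewrite | github.com/deliawolf/ACI-tollkit | ACI Endpoint/create_report.py | extract_bd_from_dn
-- ===== SOURCE A (Python) =====
-- def extract_bd_from_dn(bd_dn: str) -> str:
--     """Extract BD name from BD DN"""
--     if not bd_dn:
--         return ''
--
--     parts = bd_dn.split('/')
--     for part in parts:
--         if part.startswith('BD-'):
--             return part[3:]    # Remove 'BD-' prefix
--     return ''
-- ===== SOURCE B (Python) =====
-- def extract_bd_from_dn(bd_dn: str) -> str:
--     """Extract BD name from BD DN: single left-to-right character scan,
--     no intermediate parts list."""
--     s = bd_dn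
--     i = 0
--     while True:
--         if s.startswith('BD-', i):          # segment starts with 'BD-'
--             out = []
--             for ch in s[i + 3:]:            # collect up to the next '/'
--                 if ch == '/':
--                     break
--                 out.append(ch)
--             return ''.join(out)
--         while i < len(s) and s[i] != '/':   # skip to the end of this segment
--             i += 1
--         if i == len(s):
--             return ''
--         i += 1                              # step past the '/'
-- ===== Notes on version B (the rewrite author's own statement) =====
-- stated objective: alternative
-- what changed: Replaces split('/') plus a loop over the materialised parts list with a single left-to-right character scan that checks 'BD-' at each segment boundary and collects the name up to the next '/', allocating no intermediate list of parts.
import Mathlib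
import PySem

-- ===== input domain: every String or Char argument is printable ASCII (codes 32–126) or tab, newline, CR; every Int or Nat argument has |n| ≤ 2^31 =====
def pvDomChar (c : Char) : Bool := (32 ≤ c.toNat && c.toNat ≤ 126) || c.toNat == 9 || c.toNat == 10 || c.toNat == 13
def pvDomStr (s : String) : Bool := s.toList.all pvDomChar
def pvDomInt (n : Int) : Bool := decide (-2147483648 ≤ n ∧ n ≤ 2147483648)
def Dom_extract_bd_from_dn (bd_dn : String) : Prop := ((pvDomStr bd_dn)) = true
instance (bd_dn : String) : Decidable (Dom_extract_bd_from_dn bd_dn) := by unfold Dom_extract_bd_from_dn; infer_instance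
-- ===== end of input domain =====

-- B replaces split('/') + a loop over the parts list by one character scan over the raw string (alternative decomposition, same cost).

-- ===== PORT A =====
-- the 'for part in parts' loop with its first-match return
def pvALoop : List (List Char) → String
  | [] => ""
  | p :: rest =>
    if PySem.Chars.startswith p ['B', 'D', '-'] then
      String.ofList (PySem.Chars.slice p (some 3) none)   -- part[3:]
    else pvALoop rest

def extract_bd_from_dn (bd_dn : String) : String :=
  if bd_dn = "" then ""                                   -- if not bd_dn
  else pvALoop (PySem.Chars.splitOn bd_dn.toList ['/'])   -- parts = bd_dn.split('/')

-- ===== PORT B =====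
-- the outer 'while True' over segment starts; cs is s[i:]
def pvBScan (cs : List Char) : List Char :=
  if ['B', 'D', '-'].isPrefixOf cs then
    (cs.drop 3).takeWhile (· != '/')                      -- collect s[i+3:] up to the next '/'
  else
    match _h : cs.dropWhile (· != '/') with               -- skip to the end of this segment
    | [] => []                                            -- i == len(s)
    | _ :: t => pvBScan t                                 -- step past the '/'
termination_by cs.length
decreasing_by
  have hle := List.length_dropWhile_le (· != '/') cs
  rw [_h] at hle; simp at hle; omega

def extract_bd_from_dn_alt (bd_dn : String) : String := String.ofList (pvBScan bd_dn.toList)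

-- ===== PRECONDITION & SPEC =====
def Spec_extract_bd_from_dn (bd_dn : String) (out : String) : Prop := out = extract_bd_from_dn_alt bd_dn
instance (bd_dn : String) (out : String) : Decidable (Spec_extract_bd_from_dn bd_dn out) := by unfold Spec_extract_bd_from_dn; infer_instance

-- ===== CLAIM (what is proved, stated in full; the proofs are below) =====
def Claim_equal_extract_bd_from_dn : Prop := ∀ (bd_dn : String), Dom_extract_bd_from_dn bd_dn → Spec_extract_bd_from_dn bd_dn (extract_bd_from_dn bd_dn)

-- ===== LEMMAS AND PROOFS =====

-- recursive characterisation of splitting on a single-character separator '/'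
def pvMySplit (cs : List Char) : List (List Char) :=
  match _h : cs.dropWhile (· != '/') with
  | [] => [cs.takeWhile (· != '/')]
  | _ :: t => cs.takeWhile (· != '/') :: pvMySplit t
termination_by cs.length
decreasing_by
  have hle := List.length_dropWhile_le (· != '/') cs
  rw [_h] at hle; simp at hle; omega

theorem pvMySplit_of_nil (cs : List Char) (h : cs.dropWhile (· != '/') = []) :
    pvMySplit cs = [cs.takeWhile (· != '/')] := by
  rw [pvMySplit]; split <;> simp_all

theorem pvMySplit_of_cons (cs : List Char) (x : Char) (t : List Char)
    (h : cs.dropWhile (· != '/') = x :: t) :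
    pvMySplit cs = cs.takeWhile (· != '/') :: pvMySplit t := by
  rw [pvMySplit]; split
  · simp_all
  · rename_i y u hu; rw [h] at hu; cases hu; rfl

theorem pvBScan_of_pre (cs : List Char) (h : ['B', 'D', '-'].isPrefixOf cs = true) :
    pvBScan cs = (cs.drop 3).takeWhile (· != '/') := by
  rw [pvBScan, if_pos h]

theorem pvBScan_of_nil (cs : List Char) (h1 : ¬ ['B', 'D', '-'].isPrefixOf cs = true)
    (h : cs.dropWhile (· != '/') = []) : pvBScan cs = [] := by
  rw [pvBScan, if_neg h1]; split <;> simp_all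

theorem pvBScan_of_cons (cs : List Char) (h1 : ¬ ['B', 'D', '-'].isPrefixOf cs = true)
    (x : Char) (t : List Char) (h : cs.dropWhile (· != '/') = x :: t) :
    pvBScan cs = pvBScan t := by
  rw [pvBScan, if_neg h1]; split
  · simp_all
  · rename_i y u hu; rw [h] at hu; cases hu; rfl

theorem pvGo_eq (fuel : Nat) (l cur : List Char) (acc : List (List Char))
    (hf : l.length < fuel) :
    PySem.Chars.splitOn.go ['/'] fuel l cur acc
      = acc.reverse ++ (pvMySplit l).modifyHead (cur.reverse ++ ·) := by
  induction fuel generalizing l cur acc with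
  | zero => omega
  | succ n ih =>
    cases l with
    | nil =>
      rw [pvMySplit_of_nil [] (by simp)]
      simp [PySem.Chars.splitOn.go]
    | cons c rest =>
      by_cases hc : c = '/'
      · subst hc
        rw [show PySem.Chars.splitOn.go ['/'] (n+1) ('/' :: rest) cur acc
              = PySem.Chars.splitOn.go ['/'] n (List.drop 1 ('/' :: rest)) [] (cur.reverse :: acc) by
            simp [PySem.Chars.splitOn.go, List.isPrefixOf]]
        rw [List.drop_one, List.tail_cons,
          ih _ _ _ (by simp at hf; omega),
          pvMySplit_of_cons ('/' :: rest) '/' rest (by simp [List.dropWhile])]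
        cases pvMySplit rest <;> simp [List.takeWhile]
      · have hb1 : (c != '/') = true := by simp [hc]
        have hb2 : ('/' == c) = false := by simp [Ne.symm hc]
        rw [show PySem.Chars.splitOn.go ['/'] (n+1) (c :: rest) cur acc
              = PySem.Chars.splitOn.go ['/'] n rest (c :: cur) acc by
            simp [PySem.Chars.splitOn.go, List.isPrefixOf, hb2]]
        rw [ih _ _ _ (by simp at hf; omega)]
        have htk : (c :: rest).takeWhile (· != '/') = c :: rest.takeWhile (· != '/') := by
          simp [List.takeWhile, hb1]
        have hdw : (c :: rest).dropWhile (· != '/') = rest.dropWhile (· != '/') := by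
          simp [List.dropWhile, hb1]
        cases hr : rest.dropWhile (· != '/') with
        | nil =>
          rw [pvMySplit_of_nil rest hr, pvMySplit_of_nil (c :: rest) (hdw.trans hr)]
          simp [htk]
        | cons x t =>
          rw [pvMySplit_of_cons rest x t hr,
            pvMySplit_of_cons (c :: rest) x t (hdw.trans hr)]
          simp [htk]

theorem pvSplitOn_eq (cs : List Char) :
    PySem.Chars.splitOn cs ['/'] = pvMySplit cs := by
  unfold PySem.Chars.splitOn
  rw [pvGo_eq (cs.length + 1) cs [] [] (by omega)]
  cases pvMySplit cs <;> simp

theorem pvLoop_eq_scan (cs : List Char) :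
    pvALoop (pvMySplit cs) = String.ofList (pvBScan cs) := by
  induction cs using pvBScan.induct with
  | case1 cs hpre =>
    obtain ⟨r, rfl⟩ := List.isPrefixOf_iff_prefix.mp hpre
    rw [pvBScan_of_pre _ hpre]
    have htk : (['B','D','-'] ++ r).takeWhile (· != '/')
        = 'B' :: 'D' :: '-' :: r.takeWhile (· != '/') := by
      simp [List.takeWhile]
    have hhead : ∀ l, pvALoop ((['B','D','-'] ++ r).takeWhile (· != '/') :: l)
        = String.ofList (r.takeWhile (· != '/')) := by
      intro l
      rw [htk]
      simp [pvALoop, PySem.Chars.startswith, List.isPrefixOf, pysem]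
    cases h : (['B','D','-'] ++ r).dropWhile (· != '/') with
    | nil => rw [pvMySplit_of_nil _ h]; simpa using hhead []
    | cons x t => rw [pvMySplit_of_cons _ x t h]; simpa using hhead _
  | case2 cs hpre hdrop =>
    rw [pvBScan_of_nil cs hpre hdrop, pvMySplit_of_nil cs hdrop]
    have htk : cs.takeWhile (· != '/') = cs := by
      have := List.takeWhile_append_dropWhile (p := (· != '/')) (l := cs)
      rw [hdrop] at this; simpa using this
    simp [pvALoop, PySem.Chars.startswith, htk, hpre]
  | case3 cs hpre x t hdrop ih =>
    rw [pvBScan_of_cons cs hpre x t hdrop, pvMySplit_of_cons cs x t hdrop]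
    have hnotk : PySem.Chars.startswith (cs.takeWhile (· != '/')) ['B','D','-'] = false := by
      rw [Bool.eq_false_iff]
      intro hcon
      have hp : ['B','D','-'] <+: cs :=
        (List.isPrefixOf_iff_prefix.mp hcon).trans (List.takeWhile_prefix _)
      exact hpre (List.isPrefixOf_iff_prefix.mpr hp)
    simpa [pvALoop, hnotk] using ih

-- ===== VERDICT (by name: the statement is the Claim_ definition above) =====
theorem extract_bd_from_dn_spec : Claim_equal_extract_bd_from_dn := by
  intro bd_dn _
  unfold Spec_extract_bd_from_dn extract_bd_from_dn extract_bd_from_dn_alt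
  by_cases h : bd_dn = ""
  · subst h
    rw [if_pos rfl, show ("" : String).toList = [] by simp,
      pvBScan_of_nil [] (by decide) (by simp)]
  · rw [if_neg h, pvSplitOn_eq, pvLoop_eq_scan]
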